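-- pv_equiv track=rewrite | github.com/LucasFerreiraUBA/TP_Grupal_V1 | crear_arch_panel_gral.py | contar_sentencias
-- ===== SOURCE A (Python) =====
-- def contar_sentencias(cadena_ordenes):
--     """[Autor: Javier Acho]
--        [Ayuda: Recibe una cadena que contiene instrucciones de una función
--         separadas por coma.
--         Devuelve la cantidad de líneas que contiene la cadena y la cantidad de
--         apariciones de las siguientes sentencias: return, if/elif, for, while,
--         break.]
--     """
--
--     # instrucciones contiene cada una de las lineas de código
--     instrucciones = cadena_ordenes.rstrip("\n").split("," + "    ")
--
--     cant_lineas = cant_retorno = cant_condicionales = cant_mientras = \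
--     cant_para = cant_romper = cant_salida = 0
--
--     # las líneas de código no contienen espacios en blanco luego del último caracter de código
--     for linea_codigo in instrucciones:
--         linea_codigo = linea_codigo.lstrip()
--         cant_lineas += 1
--
--         if linea_codigo.endswith(":"):
--
--             if linea_codigo.startswith("if ") or linea_codigo.startswith("elif "):
--                 cant_condicionales += 1
--             elif linea_codigo.startswith("for "):
--                 cant_para += 1
--             elif linea_codigo.startswith("while "):
--                 cant_mientras += 1
--
--         elif linea_codigo.startswith("return ") and "if " in linea_codigo: # retorno if corto
--             cant_retorno += 1
--             cant_condicionales += 1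
--
--         elif linea_codigo.startswith("return "):
--             cant_retorno += 1
--
--         elif "break" in linea_codigo:
--             cant_romper += 1
--
--         elif "exit()" in linea_codigo:
--             cant_salida += 1
--
--     return cant_lineas, cant_condicionales, cant_para, cant_mientras, \
--     cant_romper, cant_retorno, cant_salida
-- ===== SOURCE B (Python) =====
-- def contar_sentencias(cadena_ordenes):
--     lines = [l.lstrip() for l in cadena_ordenes.rstrip("\n").split(",    ")]
--     colon = [l for l in lines if l.endswith(":")]
--     rest = [l for l in lines if not l.endswith(":")]
--     cond = sum(1 for l in colon if l.startswith(("if ", "elif "))) \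
--          + sum(1 for l in rest if l.startswith("return ") and "if " in l)
--     para = sum(1 for l in colon if l.startswith("for "))
--     mientras = sum(1 for l in colon if l.startswith("while "))
--     retorno = sum(1 for l in rest if l.startswith("return "))
--     romper = sum(1 for l in rest if not l.startswith("return ") and "break" in l)
--     salida = sum(1 for l in rest if not l.startswith("return ")
--                  and "break" not in l and "exit()" in l)
--     return len(lines), cond, para, mientras, romper, retorno, salida
-- ===== Notes on version B (the rewrite author's own statement) =====
-- stated objective: alternative
-- what changed: Replaced the single loop over lines with one if/elif ladder updating seven counters by a partition of the stripped lines on the trailing-colon test plus seven independent comprehension-sums, one per returned count, with the elif precedence encoded in each predicate.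
import Mathlib
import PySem

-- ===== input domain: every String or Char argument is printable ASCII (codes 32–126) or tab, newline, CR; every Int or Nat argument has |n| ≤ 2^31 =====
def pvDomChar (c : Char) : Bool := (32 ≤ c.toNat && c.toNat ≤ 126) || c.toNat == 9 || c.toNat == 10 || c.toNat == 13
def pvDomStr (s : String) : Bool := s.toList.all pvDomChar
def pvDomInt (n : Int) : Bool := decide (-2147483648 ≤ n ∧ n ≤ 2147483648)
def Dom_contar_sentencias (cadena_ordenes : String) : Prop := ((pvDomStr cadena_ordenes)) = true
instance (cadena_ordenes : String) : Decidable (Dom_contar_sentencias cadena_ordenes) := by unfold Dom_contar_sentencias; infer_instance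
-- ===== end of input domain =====

-- B replaces A's single if/elif-ladder loop by a colon/non-colon partition of the stripped
-- lines plus seven independent countP passes (one per returned counter); same cost, different decomposition.


-- ===== PORT A =====
-- hand port of s.rstrip("\n") (PySem has no rstrip-with-chars): drop trailing '\n'; exact
def pvRstripNl (cs : List Char) : List Char := (cs.reverse.dropWhile (· == '\n')).reverse

-- the body of A's for-loop: one line of code updates the seven counters through the if/elif ladder
def pvStepA (st : Int × Int × Int × Int × Int × Int × Int) (linea_codigo : List Char) :
    Int × Int × Int × Int × Int × Int × Int :=
  let l := PySem.Chars.lstrip linea_codigo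
  match st with
  | (cl, cc, cp, cm, cb, cr, cs) =>
    let cl := cl + 1
    if PySem.Chars.endswith l [':'] then
      if PySem.Chars.startswith l "if ".toList || PySem.Chars.startswith l "elif ".toList then
        (cl, cc + 1, cp, cm, cb, cr, cs)
      else if PySem.Chars.startswith l "for ".toList then (cl, cc, cp + 1, cm, cb, cr, cs)
      else if PySem.Chars.startswith l "while ".toList then (cl, cc, cp, cm + 1, cb, cr, cs)
      else (cl, cc, cp, cm, cb, cr, cs)
    else if PySem.Chars.startswith l "return ".toList && PySem.Chars.isIn "if ".toList l then
      (cl, cc + 1, cp, cm, cb, cr + 1, cs)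
    else if PySem.Chars.startswith l "return ".toList then (cl, cc, cp, cm, cb, cr + 1, cs)
    else if PySem.Chars.isIn "break".toList l then (cl, cc, cp, cm, cb + 1, cr, cs)
    else if PySem.Chars.isIn "exit()".toList l then (cl, cc, cp, cm, cb, cr, cs + 1)
    else (cl, cc, cp, cm, cb, cr, cs)

def contar_sentencias (cadena_ordenes : String) : Int × Int × Int × Int × Int × Int × Int :=
  let instrucciones := PySem.Chars.splitOn (pvRstripNl cadena_ordenes.toList) (",    ".toList)
  instrucciones.foldl pvStepA (0, 0, 0, 0, 0, 0, 0)

-- ===== PORT B =====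
def contar_sentencias_alt (cadena_ordenes : String) : Int × Int × Int × Int × Int × Int × Int :=
  let lines := (PySem.Chars.splitOn (pvRstripNl cadena_ordenes.toList) (",    ".toList)).map
      PySem.Chars.lstrip
  let colon := lines.filter (fun l => PySem.Chars.endswith l [':'])
  let rest := lines.filter (fun l => !PySem.Chars.endswith l [':'])
  let cond : Int :=
    (colon.countP fun l =>
        PySem.Chars.startswith l "if ".toList || PySem.Chars.startswith l "elif ".toList) +
    (rest.countP fun l =>
        PySem.Chars.startswith l "return ".toList && PySem.Chars.isIn "if ".toList l)
  let para : Int := colon.countP fun l => PySem.Chars.startswith l "for ".toList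
  let mientras : Int := colon.countP fun l => PySem.Chars.startswith l "while ".toList
  let retorno : Int := rest.countP fun l => PySem.Chars.startswith l "return ".toList
  let romper : Int := rest.countP fun l =>
    !PySem.Chars.startswith l "return ".toList && PySem.Chars.isIn "break".toList l
  let salida : Int := rest.countP fun l =>
    !PySem.Chars.startswith l "return ".toList && !PySem.Chars.isIn "break".toList l &&
      PySem.Chars.isIn "exit()".toList l
  ((lines.length : Int), cond, para, mientras, romper, retorno, salida)

-- ===== PRECONDITION & SPEC =====
def Spec_contar_sentencias (cadena_ordenes : String) (out : Int × Int × Int × Int × Int × Int × Int) : Prop := out = contar_sentencias_alt cadena_ordenes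
instance (cadena_ordenes : String) (out : Int × Int × Int × Int × Int × Int × Int) : Decidable (Spec_contar_sentencias cadena_ordenes out) := by unfold Spec_contar_sentencias; infer_instance

-- ===== CLAIM (what is proved, stated in full; the proofs are below) =====
def Claim_equal_contar_sentencias : Prop := ∀ (cadena_ordenes : String), Dom_contar_sentencias cadena_ordenes → Spec_contar_sentencias cadena_ordenes (contar_sentencias cadena_ordenes)

-- ===== LEMMAS AND PROOFS =====

-- A's loop body with the eight Boolean tests abstracted (q1 = ends-with-colon, q2 = if/elif,
-- q3 = for, q4 = while, q5 = return, q6 = 'if ' in, q7 = 'break' in, q8 = 'exit()' in)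
def pvStepGen (q1 q2 q3 q4 q5 q6 q7 q8 : List Char → Bool)
    (st : Int × Int × Int × Int × Int × Int × Int) (x : List Char) :
    Int × Int × Int × Int × Int × Int × Int :=
  match st with
  | (cl, cc, cp, cm, cb, cr, cs) =>
    let cl := cl + 1
    if q1 x then
      if q2 x then (cl, cc + 1, cp, cm, cb, cr, cs)
      else if q3 x then (cl, cc, cp + 1, cm, cb, cr, cs)
      else if q4 x then (cl, cc, cp, cm + 1, cb, cr, cs)
      else (cl, cc, cp, cm, cb, cr, cs)
    else if q5 x && q6 x then (cl, cc + 1, cp, cm, cb, cr + 1, cs)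
    else if q5 x then (cl, cc, cp, cm, cb, cr + 1, cs)
    else if q7 x then (cl, cc, cp, cm, cb + 1, cr, cs)
    else if q8 x then (cl, cc, cp, cm, cb, cr, cs + 1)
    else (cl, cc, cp, cm, cb, cr, cs)

lemma pv_fold_gen (q1 q2 q3 q4 q5 q6 q7 q8 : List Char → Bool)
    (h23 : ∀ l, q2 l = true → q3 l = false) (h24 : ∀ l, q2 l = true → q4 l = false)
    (h34 : ∀ l, q3 l = true → q4 l = false) (ls : List (List Char))
    (cl cc cp cm cb cr cs : Int) :
    ls.foldl (pvStepGen q1 q2 q3 q4 q5 q6 q7 q8) (cl, cc, cp, cm, cb, cr, cs) =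
      (cl + ls.length,
       cc + (ls.countP fun l => q2 l && q1 l) + (ls.countP fun l => (q5 l && q6 l) && !q1 l),
       cp + (ls.countP fun l => q3 l && q1 l),
       cm + (ls.countP fun l => q4 l && q1 l),
       cb + (ls.countP fun l => (!q5 l && q7 l) && !q1 l),
       cr + (ls.countP fun l => q5 l && !q1 l),
       cs + (ls.countP fun l => (!q5 l && !q7 l && q8 l) && !q1 l)) := by
  induction ls generalizing cl cc cp cm cb cr cs with
  | nil => simp
  | cons a tl ih =>
    have h23a := h23 a; have h24a := h24 a; have h34a := h34 a
    simp only [List.foldl_cons, pvStepGen]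
    split_ifs with h1 h2 h3 h4 h5 h6 h7 h8 <;>
      (rw [ih]; clear ih; simp_all) <;> omega

-- two different keyword prefixes (distinct first characters) cannot both start the same line
lemma pv_sw_disj {a b : Char} (p q : List Char) (hne : b ≠ a) (l : List Char)
    (h : PySem.Chars.startswith l (a :: p) = true) :
    PySem.Chars.startswith l (b :: q) = false := by
  rw [PySem.Chars.startswith_iff] at h
  obtain ⟨t, rfl⟩ := h
  cases hq : PySem.Chars.startswith (a :: p ++ t) (b :: q) with
  | false => rfl
  | true =>
    rw [PySem.Chars.startswith_iff, List.cons_append, List.cons_prefix_cons] at hq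
    exact absurd hq.1 hne

-- pvStepA is pvStepGen at the concrete tests (each reading the lstripped line)
lemma pvStepA_eq : pvStepA =
    pvStepGen (fun l => PySem.Chars.endswith (PySem.Chars.lstrip l) [':'])
      (fun l => PySem.Chars.startswith (PySem.Chars.lstrip l) "if ".toList ||
                PySem.Chars.startswith (PySem.Chars.lstrip l) "elif ".toList)
      (fun l => PySem.Chars.startswith (PySem.Chars.lstrip l) "for ".toList)
      (fun l => PySem.Chars.startswith (PySem.Chars.lstrip l) "while ".toList)
      (fun l => PySem.Chars.startswith (PySem.Chars.lstrip l) "return ".toList)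
      (fun l => PySem.Chars.isIn "if ".toList (PySem.Chars.lstrip l))
      (fun l => PySem.Chars.isIn "break".toList (PySem.Chars.lstrip l))
      (fun l => PySem.Chars.isIn "exit()".toList (PySem.Chars.lstrip l)) := by
  funext st x
  obtain ⟨cl, cc, cp, cm, cb, cr, cs⟩ := st
  rfl

-- ===== VERDICT (by name: the statement is the Claim_ definition above) =====
theorem contar_sentencias_spec : Claim_equal_contar_sentencias := by
  intro s _
  show contar_sentencias s = contar_sentencias_alt s
  unfold contar_sentencias contar_sentencias_alt
  rw [pvStepA_eq, pv_fold_gen]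
  · simp [List.countP_filter, List.countP_map, Function.comp_def]
  · intro l h
    rcases Bool.or_eq_true_iff.mp h with h' | h'
    · exact pv_sw_disj _ _ (by decide) _ h'
    · exact pv_sw_disj _ _ (by decide) _ h'
  · intro l h
    rcases Bool.or_eq_true_iff.mp h with h' | h'
    · exact pv_sw_disj _ _ (by decide) _ h'
    · exact pv_sw_disj _ _ (by decide) _ h'
  · intro l h
    exact pv_sw_disj _ _ (by decide) _ h
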